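-- pv_equiv track=rewrite | github.com/0x0F1x/SubGen | subdomain_generator.py | append_word_at_every_position
-- ===== SOURCE A (Python) =====
-- def append_word_at_every_position(parts, words):
--     subdomains = []
--     for w in words:
--         for i in range(len(parts) - 2):
--             tmp_parts = parts[:]
--             tmp_parts[i] = "{}{}".format(tmp_parts[i], w)
--             subdomains.append(".".join(tmp_parts))
--             tmp_parts[i] = "{}-{}".format(tmp_parts[i], w)
--             subdomains.append(".".join(tmp_parts))
--     return subdomains
-- ===== SOURCE B (Python) =====
-- def append_word_at_every_position(parts, words):
--     n = len(parts) - 2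
--     pre = ["" if i == 0 else ".".join(parts[:i]) + "." for i in range(n)]
--     suf = ["." + ".".join(parts[i + 1:]) for i in range(n)]
--     subdomains = []
--     for w in words:
--         for i in range(n):
--             v1 = parts[i] + w
--             subdomains.append(pre[i] + v1 + suf[i])
--             subdomains.append(pre[i] + v1 + "-" + w + suf[i])
--     return subdomains
-- ===== Notes on version B (the rewrite author's own statement) =====
-- stated objective: alternative
-- what changed: Instead of copying the whole parts list and mutating slot i before each join, B precomputes prefix/suffix join tables once and assembles each subdomain by direct string concatenation.
import Mathlib
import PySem

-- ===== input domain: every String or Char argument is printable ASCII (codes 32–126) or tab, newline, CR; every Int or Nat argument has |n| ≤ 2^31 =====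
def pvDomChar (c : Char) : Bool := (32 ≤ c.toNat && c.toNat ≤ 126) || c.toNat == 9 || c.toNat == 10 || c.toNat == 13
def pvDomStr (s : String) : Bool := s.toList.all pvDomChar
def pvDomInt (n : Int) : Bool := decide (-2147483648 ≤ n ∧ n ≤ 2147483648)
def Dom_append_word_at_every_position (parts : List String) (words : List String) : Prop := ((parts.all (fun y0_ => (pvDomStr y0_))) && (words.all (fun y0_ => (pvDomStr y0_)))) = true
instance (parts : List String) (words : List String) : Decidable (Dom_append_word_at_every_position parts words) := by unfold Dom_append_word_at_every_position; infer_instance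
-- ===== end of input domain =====

-- B replaces A's per-item full list copy + in-place mutation + join with precomputed
-- prefix/suffix join tables and direct string concatenation (objective: alternative decomposition).

-- ===== PORT A =====
def append_word_at_every_position (parts : List String) (words : List String) : List String :=
  words.foldl (fun acc w =>
    (List.range (parts.length - 2)).foldl (fun acc i =>
      -- tmp_parts = parts[:]; tmp_parts[i] = tmp_parts[i] + w  (i always in range)
      let t1 := parts.set i (parts.getD i "" ++ w)
      let acc := acc ++ [PySem.Str.join "." t1]
      -- tmp_parts[i] = tmp_parts[i] + "-" + w
      let t2 := t1.set i (t1.getD i "" ++ "-" ++ w)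
      acc ++ [PySem.Str.join "." t2]) acc) []

-- ===== PORT B =====
def append_word_at_every_position_alt (parts : List String) (words : List String) : List String :=
  let n := parts.length - 2
  let pre := (List.range n).map (fun i => if i = 0 then "" else PySem.Str.join "." (parts.take i) ++ ".")
  let suf := (List.range n).map (fun i => "." ++ PySem.Str.join "." (parts.drop (i + 1)))
  words.foldl (fun acc w =>
    (List.range n).foldl (fun acc i =>
      let v1 := parts.getD i "" ++ w
      acc ++ [pre.getD i "" ++ v1 ++ suf.getD i "",
              pre.getD i "" ++ v1 ++ "-" ++ w ++ suf.getD i ""]) acc) []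

-- ===== PRECONDITION & SPEC =====
def Spec_append_word_at_every_position (parts : List String) (words : List String) (out : List String) : Prop := out = append_word_at_every_position_alt parts words
instance (parts : List String) (words : List String) (out : List String) : Decidable (Spec_append_word_at_every_position parts words out) := by unfold Spec_append_word_at_every_position; infer_instance

-- ===== CLAIM (what is proved, stated in full; the proofs are below) =====
def Claim_equal_append_word_at_every_position : Prop := ∀ (parts : List String) (words : List String), Dom_append_word_at_every_position parts words → Spec_append_word_at_every_position parts words (append_word_at_every_position parts words)

-- ===== LEMMAS AND PROOFS =====

theorem pv_join_cons (x : String) (t : List String) (ht : t ≠ []) :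
    PySem.Str.join "." (x :: t) = x ++ "." ++ PySem.Str.join "." t := by
  apply String.toList_inj.mp
  cases t with
  | nil => simp at ht
  | cons b u =>
    simp [PySem.Str.toList_join, String.toList_append, PySem.Chars.join,
          List.intercalate, List.append_assoc]

theorem pv_join_set (l : List String) (i : Nat) (v : String) (h : i + 1 < l.length) :
    PySem.Str.join "." (l.set i v) =
      (if i = 0 then "" else PySem.Str.join "." (l.take i) ++ ".") ++ v ++
        ("." ++ PySem.Str.join "." (l.drop (i + 1))) := by
  induction l generalizing i with
  | nil => simp at h
  | cons a t ih =>
    cases i with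
    | zero =>
      have ht : t ≠ [] := by
        intro he; subst he; simp at h
      simp only [List.set, List.drop]
      rw [pv_join_cons _ _ ht]
      simp [String.append_assoc]
    | succ j =>
      have hj : j + 1 < t.length := by simpa using h
      have ht : t ≠ [] := by
        intro he; subst he; simp at hj
      have hset : t.set j v ≠ [] := by
        intro he
        have := congrArg List.length he
        simp at this
        subst this; simp at hj
      rw [show (a :: t).set (j + 1) v = a :: t.set j v from rfl,
          pv_join_cons _ _ hset, ih j hj]
      simp only [show (j + 1 = 0) = False by simp]
      rw [show (a :: t).take (j + 1) = a :: t.take j from rfl,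
          show (a :: t).drop (j + 1 + 1) = t.drop (j + 1) from rfl]
      cases j with
      | zero =>
        simp only [List.take]
        have : PySem.Str.join "." [a] = a := by
          apply String.toList_inj.mp
          simp [PySem.Str.toList_join, PySem.Chars.join, List.intercalate]
        rw [this]
        simp [String.append_assoc]
      | succ k =>
        have htk : t.take (k + 1) ≠ [] := by
          intro he
          rcases List.take_eq_nil_iff.mp he with h' | h'
          · exact Nat.succ_ne_zero k h'
          · exact ht h'
        rw [if_neg (Nat.succ_ne_zero k), pv_join_cons _ _ htk]
        simp [String.append_assoc]

-- ===== VERDICT (by name: the statement is the Claim_ definition above) =====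
theorem append_word_at_every_position_spec : Claim_equal_append_word_at_every_position := by
  intro parts words _
  unfold Spec_append_word_at_every_position append_word_at_every_position
    append_word_at_every_position_alt
  apply PySem.List.foldl_congr_mem
  intro acc w _
  apply PySem.List.foldl_congr_mem
  intro acc2 i hi
  have hn : i < parts.length - 2 := List.mem_range.mp hi
  have h1 : i + 1 < parts.length := by omega
  have hgd : ((parts.set i (parts.getD i "" ++ w)).getD i "") = parts.getD i "" ++ w := by
    simp [List.getD_eq_getElem?_getD, List.getElem?_set_self (by omega : i < parts.length)]
  simp only [hgd, List.set_set, pv_join_set _ _ _ h1,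
    PySem.List.getD_map_range _ _ _ _ hn]
  simp [String.append_assoc]
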